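-- pv_equiv track=rewrite | github.com/andrea220/tQuant | tensorquant/markethandles/volatilitysurface.py | _find_bounds
-- ===== SOURCE A (Python) =====
-- def _find_bounds(array, value):
--     """Find the two closest indices in `array` that bound `value`."""
--     lower = 0
--     upper = len(array) - 1
--
--     # Handle boundary cases
--     if value <= array[lower]:
--         return lower, lower
--     if value >= array[upper]:
--         return upper, upper
--
--     # Search for the correct bounds
--     for i in range(len(array) - 1):
--         if array[i] <= value <= array[i + 1]:
--             return i, i + 1
--
--     return lower, upper  # should not reach here if value is within bounds
-- ===== SOURCE B (Python) =====
-- def _find_bounds(array, value):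
--     """Find the two closest indices in `array` that bound `value`."""
--     n = len(array)
--     if value <= array[0]:
--         return 0, 0
--     if value >= array[n - 1]:
--         return n - 1, n - 1
--     # binary search for the leftmost index whose element is >= value
--     lo, hi = 0, n
--     while lo < hi:
--         mid = (lo + hi) // 2
--         if array[mid] < value:
--             lo = mid + 1
--         else:
--             hi = mid
--     return lo - 1, lo
-- ===== Notes on version B (the rewrite author's own statement) =====
-- stated objective: faster
-- what changed: Replaces A's linear scan over adjacent pairs with a hand-written binary search for the leftmost element >= value (bisect_left), returning (j-1, j).
-- outside the precondition, e.g. on _find_bounds([0, 3, 1, 5], 2): A returns (0, 1), B returns (2, 3)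
import Mathlib
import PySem

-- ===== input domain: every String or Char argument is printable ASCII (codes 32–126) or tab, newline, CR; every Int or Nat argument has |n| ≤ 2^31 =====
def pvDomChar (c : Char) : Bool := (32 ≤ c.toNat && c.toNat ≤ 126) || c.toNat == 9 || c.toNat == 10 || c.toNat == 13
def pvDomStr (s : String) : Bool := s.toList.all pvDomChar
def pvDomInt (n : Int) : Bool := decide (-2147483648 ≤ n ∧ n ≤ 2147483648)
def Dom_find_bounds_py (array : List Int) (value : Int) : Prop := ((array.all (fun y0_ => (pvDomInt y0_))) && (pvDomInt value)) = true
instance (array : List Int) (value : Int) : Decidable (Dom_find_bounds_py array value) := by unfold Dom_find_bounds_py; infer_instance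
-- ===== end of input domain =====

-- B replaces A's O(n) linear scan for the bracketing pair with an O(log n) hand-written
-- binary search (bisect_left) on the sorted array; equivalence is proved on nonempty sorted arrays.

-- ===== PORT A =====
-- 'for i in range(len(array)-1): if array[i] <= value <= array[i+1]: return i, i+1' then 'return lower, upper'
def findBoundsLoop (array : List Int) (value : Int) : List Nat → Int × Int
  | [] => (0, (array.length : Int) - 1)
  | i :: rest =>
    if PySem.List.pyGetD array (i : Int) 0 ≤ value ∧ value ≤ PySem.List.pyGetD array ((i : Int) + 1) 0 then
      ((i : Int), (i : Int) + 1)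
    else findBoundsLoop array value rest

def find_bounds_py (array : List Int) (value : Int) : Int × Int :=
  let lower : Int := 0
  let upper : Int := (array.length : Int) - 1
  if value ≤ PySem.List.pyGetD array lower 0 then (lower, lower)
  else if value ≥ PySem.List.pyGetD array upper 0 then (upper, upper)
  else findBoundsLoop array value (List.range (array.length - 1))

-- ===== PORT B =====
-- 'while lo < hi: mid = (lo+hi)//2; if array[mid] < value: lo = mid+1 else: hi = mid'
-- (the while loop is ported structurally with fuel hi - lo, which bounds its iteration count)
def bisectLeftGo (array : List Int) (value : Int) : Nat → Nat → Nat → Nat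
  | 0, lo, _ => lo
  | fuel + 1, lo, hi =>
    if lo < hi then
      if PySem.List.pyGetD array ((((lo + hi) / 2 : Nat)) : Int) 0 < value then
        bisectLeftGo array value fuel ((lo + hi) / 2 + 1) hi
      else
        bisectLeftGo array value fuel lo ((lo + hi) / 2)
    else lo

def bisectLeft (array : List Int) (value : Int) (lo hi : Nat) : Nat :=
  bisectLeftGo array value (hi - lo) lo hi

def find_bounds_py_alt (array : List Int) (value : Int) : Int × Int :=
  let n := array.length
  if value ≤ PySem.List.pyGetD array 0 0 then (0, 0)
  else if value ≥ PySem.List.pyGetD array ((n : Int) - 1) 0 then ((n : Int) - 1, (n : Int) - 1)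
  else
    let j := bisectLeft array value 0 n
    ((j : Int) - 1, (j : Int))

-- ===== PRECONDITION & SPEC =====
-- Pre_ excludes the empty array, on which A raises IndexError, and unsorted arrays whose value
-- falls strictly inside the endpoints, where a linear scan's and a binary search's bracketing
-- answers are both accidental (the function is documented for sorted grids only).
def Pre_find_bounds_py (array : List Int) (value : Int) : Prop :=
  array ≠ [] ∧ (value ≤ array.getD 0 0 ∨ array.getD (array.length - 1) 0 ≤ value ∨
    array.Pairwise (· ≤ ·))
instance (array : List Int) (value : Int) : Decidable (Pre_find_bounds_py array value) := by
  unfold Pre_find_bounds_py; infer_instance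

def pvWitness_find_bounds_py : List Int × Int := ([0, 2, 5], 3)

def Spec_find_bounds_py (array : List Int) (value : Int) (out : Int × Int) : Prop := out = find_bounds_py_alt array value
instance (array : List Int) (value : Int) (out : Int × Int) : Decidable (Spec_find_bounds_py array value out) := by unfold Spec_find_bounds_py; infer_instance

-- ===== CLAIM (what is proved, stated in full; the proofs are below) =====
def Claim_equal_find_bounds_py : Prop := ∀ (array : List Int) (value : Int), Dom_find_bounds_py array value → Pre_find_bounds_py array value → Spec_find_bounds_py array value (find_bounds_py array value)

-- ===== LEMMAS AND PROOFS =====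

-- monotone indexing out of sortedness
theorem pv_mono (array : List Int) (hs : array.Pairwise (· ≤ ·)) :
    ∀ i j : Nat, i ≤ j → j < array.length → array.getD i 0 ≤ array.getD j 0 := by
  intro i j hij hj
  rcases Nat.lt_or_ge i j with h | h
  · have hi : i < array.length := lt_trans h hj
    rw [array.getD_eq_getElem 0 hi, array.getD_eq_getElem 0 hj]
    exact (List.pairwise_iff_getElem.mp hs) i j hi hj h
  · have : i = j := le_antisymm hij h
    subst this; exact le_refl _

-- full characterisation of the binary search
theorem pv_bisect_go_spec (array : List Int) (value : Int)
    (hmono : ∀ i j : Nat, i ≤ j → j < array.length → array.getD i 0 ≤ array.getD j 0) :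
    ∀ (d lo hi : Nat), hi - lo ≤ d → hi ≤ array.length → lo ≤ hi →
    (∀ k, k < lo → array.getD k 0 < value) →
    (∀ k, hi ≤ k → k < array.length → value ≤ array.getD k 0) →
    lo ≤ bisectLeftGo array value d lo hi ∧ bisectLeftGo array value d lo hi ≤ hi ∧
    (∀ k, k < bisectLeftGo array value d lo hi → array.getD k 0 < value) ∧
    (∀ k, bisectLeftGo array value d lo hi ≤ k → k < array.length → value ≤ array.getD k 0) := by
  intro d
  induction d with
  | zero =>
    intro lo hi hd hhi hle hlo hhiB
    have hlh : lo = hi := by omega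
    simp only [bisectLeftGo]
    exact ⟨le_refl _, by omega, hlo, fun k hk hkl => hhiB k (by omega) hkl⟩
  | succ d ih =>
    intro lo hi hd hhi hle hlo hhiB
    simp only [bisectLeftGo]
    by_cases hlt : lo < hi
    · rw [if_pos hlt]
      have hmid1 : lo ≤ (lo + hi) / 2 := by omega
      have hmid2 : (lo + hi) / 2 < hi := by omega
      by_cases hc : PySem.List.pyGetD array (((lo + hi) / 2 : Nat) : Int) 0 < value
      · rw [if_pos hc]
        rw [PySem.List.pyGetD_natCast] at hc
        obtain ⟨g1, g2, g3, g4⟩ := ih ((lo + hi) / 2 + 1) hi (by omega) hhi (by omega)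
          (fun k hk => lt_of_le_of_lt (hmono k ((lo + hi) / 2) (by omega) (by omega)) hc) hhiB
        exact ⟨by omega, g2, g3, g4⟩
      · rw [if_neg hc]
        rw [PySem.List.pyGetD_natCast] at hc
        have hc' : value ≤ array.getD ((lo + hi) / 2) 0 := by omega
        have hres := ih lo ((lo + hi) / 2) (by omega) (by omega) (by omega)
          hlo (fun k hk hkl => le_trans hc' (hmono ((lo + hi) / 2) k hk hkl))
        exact ⟨hres.1, by omega, hres.2.2⟩
    · rw [if_neg hlt]
      exact ⟨le_refl _, by omega, hlo, fun k hk hkl => hhiB k (by omega) hkl⟩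

theorem pv_bisect_spec (array : List Int) (value : Int)
    (hmono : ∀ i j : Nat, i ≤ j → j < array.length → array.getD i 0 ≤ array.getD j 0)
    (lo hi : Nat) (hhi : hi ≤ array.length) (hle : lo ≤ hi)
    (hlo : ∀ k, k < lo → array.getD k 0 < value)
    (hhiB : ∀ k, hi ≤ k → k < array.length → value ≤ array.getD k 0) :
    lo ≤ bisectLeft array value lo hi ∧ bisectLeft array value lo hi ≤ hi ∧
    (∀ k, k < bisectLeft array value lo hi → array.getD k 0 < value) ∧
    (∀ k, bisectLeft array value lo hi ≤ k → k < array.length → value ≤ array.getD k 0) :=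
  pv_bisect_go_spec array value hmono (hi - lo) lo hi (le_refl _) hhi hle hlo hhiB

-- the linear scan returns the first bracketing index
theorem pv_loop_range' (array : List Int) (value : Int) :
    ∀ (k s t : Nat), s ≤ t → t < s + k →
    (∀ i, s ≤ i → i < t →
      ¬ (PySem.List.pyGetD array (i : Int) 0 ≤ value ∧ value ≤ PySem.List.pyGetD array ((i : Int) + 1) 0)) →
    (PySem.List.pyGetD array (t : Int) 0 ≤ value ∧ value ≤ PySem.List.pyGetD array ((t : Int) + 1) 0) →
    findBoundsLoop array value (List.range' s k) = ((t : Int), (t : Int) + 1) := by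
  intro k
  induction k with
  | zero => intro s t h1 h2 _ _; omega
  | succ k ih =>
    intro s t h1 h2 hfail hcond
    rw [List.range'_succ]
    simp only [findBoundsLoop]
    by_cases hs : s = t
    · subst hs; rw [if_pos hcond]
    · have hst : s < t := lt_of_le_of_ne h1 hs
      rw [if_neg (hfail s (le_refl s) hst)]
      exact ih (s + 1) t (by omega) (by omega) (fun i hi hit => hfail i (by omega) hit) hcond

theorem pv_main : ∀ (array : List Int) (value : Int), Pre_find_bounds_py array value →
    find_bounds_py array value = find_bounds_py_alt array value := by
  intro array value ⟨hne, hpre⟩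
  have hn : 0 < array.length := List.length_pos_of_ne_nil hne
  have hcast : ((array.length : Int) - 1) = (((array.length - 1 : Nat)) : Int) := by
    push_cast [hn]; omega
  unfold find_bounds_py find_bounds_py_alt
  simp only [hcast, PySem.List.pyGetD_natCast, PySem.List.pyGetD_zero]
  by_cases h1 : value ≤ array.getD 0 0
  · rw [if_pos h1, if_pos h1]
  · rw [if_neg h1, if_neg h1]
    by_cases h2 : value ≥ array.getD (array.length - 1) 0
    · rw [if_pos h2, if_pos h2]
    · rw [if_neg h2, if_neg h2]
      rw [not_le] at h1
      rw [ge_iff_le, not_le] at h2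
      have hsorted : array.Pairwise (· ≤ ·) := by
        rcases hpre with h | h | h
        · omega
        · omega
        · exact h
      have hmono := pv_mono array hsorted
      have hn2 : 2 ≤ array.length := by
        by_contra hlt
        have e : array.length - 1 = 0 := by omega
        rw [e] at h2; omega
      have hspec := pv_bisect_spec array value hmono 0 array.length
        (le_refl _) (Nat.zero_le _) (by omega) (by omega)
      set j := bisectLeft array value 0 array.length with hj
      obtain ⟨-, hjle, hjlt, hjge⟩ := hspec
      have hj1 : 1 ≤ j := by
        by_contra h0
        have : value ≤ array.getD 0 0 := hjge 0 (by omega) hn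
        omega
      have hjn : j ≤ array.length - 1 := by
        by_contra hbig
        have : array.getD (array.length - 1) 0 < value := hjlt (array.length - 1) (by omega)
        omega
      have hloop := pv_loop_range' array value (array.length - 1) 0 (j - 1) (Nat.zero_le _)
        (by omega)
        (by
          intro i _ hit
          simp only [PySem.List.pyGetD_natCast, not_and, not_le]
          intro _
          have hcast2 : ((i : Int) + 1) = ((i + 1 : Nat) : Int) := by push_cast; ring
          rw [hcast2, PySem.List.pyGetD_natCast]
          exact hjlt (i + 1) (by omega))
        (by
          constructor
          · rw [PySem.List.pyGetD_natCast]
            exact le_of_lt (hjlt (j - 1) (by omega))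
          · have hcast3 : (((j - 1 : Nat)) : Int) + 1 = ((j : Nat) : Int) := by
              push_cast [hj1]; ring
            rw [hcast3, PySem.List.pyGetD_natCast]
            exact hjge j (le_refl j) (by omega))
      rw [← List.range_eq_range'] at hloop
      rw [hloop, Prod.mk.injEq]
      constructor <;> omega

-- ===== VERDICT (by name: the statement is the Claim_ definition above) =====
theorem find_bounds_py_spec : Claim_equal_find_bounds_py := by
  intro array value _ hpre
  unfold Spec_find_bounds_py
  exact pv_main array value hpre
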